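-- pv_equiv track=rewrite | github.com/jpelgrim/adventofcode | 2015/aoc_2015_python/day11.py | _has_2_double_chars
-- ===== SOURCE A (Python) =====
-- def _has_2_double_chars(password):
--     double_char_count = 0
--
--     i = 0
--     while i < len(password) - 1:
--         char_i = password[i]
--         if password[i + 1] == char_i:
--             double_char_count += 1
--             i += 1  # <- This is why we can't combine the double and the triple char check functions easily
--
--         if double_char_count == 2:
--             return True
--
--         i += 1
--
--     return False
-- ===== SOURCE B (Python) =====
-- def _has_2_double_chars(password):
--     # Two non-overlapping adjacent-equal pairs exist iff the earliest and the
--     # latest pair positions are at least 2 apart (interval-scheduling fact).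
--     idxs = [i for i in range(len(password) - 1) if password[i] == password[i + 1]]
--     return len(idxs) >= 2 and idxs[-1] - idxs[0] >= 2
-- ===== Notes on version B (the rewrite author's own statement) =====
-- stated objective: alternative
-- what changed: Replaces the greedy skip-on-match counting loop by a two-stage characterization: first collect every index with an adjacent-equal pair, then return len(idxs) >= 2 and idxs[-1] - idxs[0] >= 2, using the fact that two non-overlapping pairs exist iff the earliest and latest pair positions are at least 2 apart.
import Mathlib
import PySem

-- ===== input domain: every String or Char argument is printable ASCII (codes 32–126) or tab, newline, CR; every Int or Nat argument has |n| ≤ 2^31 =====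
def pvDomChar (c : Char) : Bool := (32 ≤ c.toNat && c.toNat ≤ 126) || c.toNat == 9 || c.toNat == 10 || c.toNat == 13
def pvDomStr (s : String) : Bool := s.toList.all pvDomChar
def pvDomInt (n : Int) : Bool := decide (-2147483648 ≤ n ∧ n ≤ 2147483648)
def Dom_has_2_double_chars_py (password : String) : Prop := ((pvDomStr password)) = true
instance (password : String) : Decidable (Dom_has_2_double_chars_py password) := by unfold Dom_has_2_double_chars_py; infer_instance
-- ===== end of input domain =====

-- B replaces A's greedy skip-on-match counting loop by a two-stage characterization:
-- collect every adjacent-equal position, then test len >= 2 and last - first >= 2.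

-- ===== PORT A =====
-- A's while loop; state = (double_char_count, i); the `if double_char_count == 2` check
-- runs each iteration, so it appears in both branches of the match test.
def pvLoopA (cs : List Char) (count i : Nat) : Bool :=
  if h : i + 1 < cs.length then
    if cs[i + 1]! = cs[i]! then
      if count + 1 = 2 then true else pvLoopA cs (count + 1) (i + 2)
    else
      if count = 2 then true else pvLoopA cs count (i + 1)
  else false
termination_by cs.length - i
decreasing_by all_goals omega

def has_2_double_chars_py (password : String) : Bool :=
  pvLoopA password.toList 0 0

-- ===== PORT B =====
-- Source B's list comprehension: all indices i with password[i] == password[i+1]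
def pvIdxsB (cs : List Char) : List Nat :=
  (List.range (cs.length - 1)).filter (fun i => cs[i]! = cs[i + 1]!)

def has_2_double_chars_py_alt (password : String) : Bool :=
  let idxs := pvIdxsB password.toList
  decide (2 ≤ idxs.length) && decide ((2 : Int) ≤ (idxs.getLast! : Int) - (idxs.head! : Int))

-- ===== PRECONDITION & SPEC =====
def Spec_has_2_double_chars_py (password : String) (out : Bool) : Prop := out = has_2_double_chars_py_alt password
instance (password : String) (out : Bool) : Decidable (Spec_has_2_double_chars_py password out) := by unfold Spec_has_2_double_chars_py; infer_instance

-- ===== CLAIM =====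
def Claim_equal_has_2_double_chars_py : Prop := ∀ (password : String), Dom_has_2_double_chars_py password → Spec_has_2_double_chars_py password (has_2_double_chars_py password)

-- ===== LEMMAS AND PROOFS =====

-- greedy non-overlapping adjacent-pair count: the semantics of A's loop
def pvGreedy : List Char → Nat
  | a :: b :: rest => if a = b then pvGreedy rest + 1 else pvGreedy (b :: rest)
  | _ => 0

theorem loopA_greedy (n : Nat) (cs : List Char) (c i : Nat)
    (hn : cs.length - i = n) (hc : c < 2) :
    pvLoopA cs c i = decide (2 ≤ c + pvGreedy (cs.drop i)) := by
  induction n using Nat.strong_induction_on generalizing c i with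
  | _ n ih =>
  rw [pvLoopA]
  by_cases h : i + 1 < cs.length
  · have hi : i < cs.length := by omega
    have hd : cs.drop i = cs[i] :: cs.drop (i + 1) := List.drop_eq_getElem_cons hi
    have hd2 : cs.drop (i + 1) = cs[i + 1] :: cs.drop (i + 2) := List.drop_eq_getElem_cons h
    have hg1 : cs[i]! = cs[i] := getElem!_pos cs i hi
    have hg2 : cs[i + 1]! = cs[i + 1] := getElem!_pos cs (i + 1) h
    rw [dif_pos h, hg1, hg2, hd, hd2]
    show _ = decide (2 ≤ c + pvGreedy (cs[i] :: cs[i + 1] :: cs.drop (i + 2)))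
    rw [pvGreedy]
    by_cases heq : cs[i + 1] = cs[i]
    · rw [if_pos heq, if_pos heq.symm]
      by_cases hc2 : c + 1 = 2
      · rw [if_pos hc2]
        have hge : (2:Nat) ≤ c + (pvGreedy (cs.drop (i + 2)) + 1) := by omega
        simp [hge]
      · rw [if_neg hc2,
          ih (cs.length - (i + 2)) (by omega) (c + 1) (i + 2) rfl (by omega)]
        simp only [decide_eq_decide]
        omega
    · rw [if_neg heq, if_neg (show ¬ c = 2 by omega),
        ih (cs.length - (i + 1)) (by omega) c (i + 1) rfl hc, hd2,
        if_neg (fun hab => heq hab.symm)]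
  · rw [dif_neg h]
    have hz : pvGreedy (cs.drop i) = 0 := by
      have hlen : (cs.drop i).length ≤ 1 := by simp; omega
      match hm : cs.drop i, hlen with
      | [], _ => rfl
      | [a], _ => rfl
    rw [hz]
    simp
    omega

-- structural decomposition of pvIdxsB on a two-or-more-element list
theorem idxsB_cons (a b : Char) (r : List Char) :
    pvIdxsB (a :: b :: r) =
      (if a = b then [0] else []) ++ (pvIdxsB (b :: r)).map (· + 1) := by
  unfold pvIdxsB
  have hl1 : (a :: b :: r).length - 1 = (b :: r).length - 1 + 1 := by simp
  rw [hl1, List.range_succ_eq_map, List.filter_cons, List.filter_map]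
  have hmap : (List.range ((b :: r).length - 1)).filter
        ((fun i => decide ((a :: b :: r)[i]! = (a :: b :: r)[i + 1]!)) ∘ Nat.succ)
      = (List.range ((b :: r).length - 1)).filter
        (fun i => decide ((b :: r)[i]! = (b :: r)[i + 1]!)) := by
    apply List.filter_congr
    intro i _
    simp [Function.comp]
  rw [hmap]
  by_cases hab : a = b <;> simp [hab]

theorem idxsB_short (l : List Char) (h : l.length ≤ 1) : pvIdxsB l = [] := by
  unfold pvIdxsB
  have : l.length - 1 = 0 := by omega
  rw [this]
  rfl

-- a pair exists somewhere ↔ the index list is nonempty ↔ greedy count ≥ 1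
theorem greedy_pos_iff (l : List Char) : 1 ≤ pvGreedy l ↔ pvIdxsB l ≠ [] := by
  fun_induction pvGreedy l with
  | case1 b rest ih =>
    rw [idxsB_cons]
    simp
  | case2 a b rest h ih =>
    rw [idxsB_cons, if_neg h, List.nil_append]
    simpa using ih
  | case3 l hx =>
    have hl : l.length ≤ 1 := by
      cases l with
      | nil => simp
      | cons a t =>
        cases t with
        | nil => simp
        | cons b r => exact absurd rfl (hx a b r)
    rw [idxsB_short l hl]
    simp

-- greedy count ≥ 2 ↔ two pair positions at distance ≥ 2 exist
theorem greedy_two_iff (l : List Char) :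
    2 ≤ pvGreedy l ↔ ∃ i ∈ pvIdxsB l, ∃ j ∈ pvIdxsB l, i + 2 ≤ j := by
  fun_induction pvGreedy l with
  | case1 b rest ih =>
    rw [idxsB_cons, if_pos rfl]
    constructor
    · intro h2
      have h1 : pvIdxsB rest ≠ [] := (greedy_pos_iff rest).mp (by omega)
      obtain ⟨c, r', rfl⟩ : ∃ c r', rest = c :: r' := by
        cases rest with
        | nil => exact absurd (idxsB_short [] (by simp)) h1
        | cons c r' => exact ⟨c, r', rfl⟩
      obtain ⟨k, hk⟩ : ∃ k, k ∈ pvIdxsB (c :: r') := by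
        cases hm : pvIdxsB (c :: r') with
        | nil => exact absurd hm h1
        | cons k ks => exact ⟨k, List.mem_cons_self⟩
      refine ⟨0, by simp, k + 1 + 1, ?_, by omega⟩
      refine List.mem_append.mpr (Or.inr ?_)
      refine List.mem_map.mpr ⟨k + 1, ?_, rfl⟩
      rw [idxsB_cons]
      exact List.mem_append.mpr (Or.inr (List.mem_map.mpr ⟨k, hk, rfl⟩))
    · rintro ⟨i, hi, j, hj, hij⟩
      have hjge : 2 ≤ j := by omega
      have hne : pvIdxsB rest ≠ [] := by
        rcases List.mem_append.mp hj with hj0 | hjm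
        · simp at hj0; omega
        · obtain ⟨a', ha', rfl⟩ := List.mem_map.mp hjm
          have ha1 : 1 ≤ a' := by omega
          cases rest with
          | nil =>
            rw [idxsB_short [b] (by simp)] at ha'
            cases ha'
          | cons c r' =>
            rw [idxsB_cons] at ha'
            rcases List.mem_append.mp ha' with h0 | hm
            · (split at h0 <;> simp at h0); omega
            · obtain ⟨t, ht, rfl⟩ := List.mem_map.mp hm
              intro hemp
              rw [hemp] at ht
              cases ht
      have := (greedy_pos_iff rest).mpr hne
      omega
  | case2 a b rest h ih =>
    rw [idxsB_cons, if_neg h, List.nil_append]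
    rw [ih]
    constructor
    · rintro ⟨i, hi, j, hj, hij⟩
      exact ⟨i + 1, List.mem_map.mpr ⟨i, hi, rfl⟩, j + 1,
        List.mem_map.mpr ⟨j, hj, rfl⟩, by omega⟩
    · rintro ⟨i, hi, j, hj, hij⟩
      rcases List.mem_map.mp hi with ⟨i', hi', rfl⟩
      rcases List.mem_map.mp hj with ⟨j', hj', rfl⟩
      exact ⟨i', hi', j', hj', by omega⟩
  | case3 l hx =>
    have hl : l.length ≤ 1 := by
      cases l with
      | nil => simp
      | cons a t =>
        cases t with
        | nil => simp
        | cons b r => exact absurd rfl (hx a b r)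
    rw [idxsB_short l hl]
    simp

theorem idxsB_pairwise (l : List Char) : (pvIdxsB l).Pairwise (· < ·) :=
  List.Pairwise.sublist List.filter_sublist List.pairwise_lt_range

theorem sorted_head_le {l : List Nat} (h : l.Pairwise (· < ·)) {x : Nat}
    (hx : x ∈ l) : l.head! ≤ x := by
  match l with
  | [] => cases hx
  | a :: t =>
    rcases List.mem_cons.mp hx with rfl | hxt
    · simp
    · have := (List.pairwise_cons.mp h).1 x hxt
      simp
      omega

theorem sorted_le_getLast (l : List Nat) (h : l.Pairwise (· < ·)) :
    ∀ x ∈ l, x ≤ l.getLast! := by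
  induction l with
  | nil => intro x hx; cases hx
  | cons a t ih =>
    intro x hx
    match t with
    | [] =>
      rcases List.mem_cons.mp hx with rfl | hxt
      · simp [List.getLast!]
      · cases hxt
    | b :: t' =>
      have hgl : (a :: b :: t').getLast! = (b :: t').getLast! := by
        simp [List.getLast!]
      rw [hgl]
      rcases List.mem_cons.mp hx with rfl | hxt
      · have hb : x < b := ((List.pairwise_cons.mp h).1 b (by simp))
        have := ih (List.pairwise_cons.mp h).2 b (by simp)
        omega
      · exact ih (List.pairwise_cons.mp h).2 x hxt

theorem head_mem_of_ne_nil {l : List Nat} (h : l ≠ []) : l.head! ∈ l := by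
  match l with
  | [] => exact absurd rfl h
  | a :: t => simp

theorem getLast_mem_of_ne_nil {l : List Nat} (h : l ≠ []) : l.getLast! ∈ l := by
  match l with
  | [] => exact absurd rfl h
  | a :: t => simp [List.getLast!]

-- a sorted index list admits two elements at distance ≥ 2 iff len ≥ 2 and last − first ≥ 2
theorem sorted_exists_iff (l : List Nat) (h : l.Pairwise (· < ·)) :
    (∃ i ∈ l, ∃ j ∈ l, i + 2 ≤ j) ↔
      (2 ≤ l.length ∧ (2 : Int) ≤ (l.getLast! : Int) - (l.head! : Int)) := by
  constructor
  · rintro ⟨i, hi, j, hj, hij⟩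
    have h1 : l.head! ≤ i := sorted_head_le h hi
    have h2 : j ≤ l.getLast! := sorted_le_getLast l h j hj
    refine ⟨?_, by omega⟩
    match l, hi, hj with
    | [a], hi, hj =>
      simp at hi hj; omega
    | a :: b :: t, _, _ => simp
  · rintro ⟨hlen, hdiff⟩
    have hne : l ≠ [] := by intro he; rw [he] at hlen; simp at hlen
    exact ⟨l.head!, head_mem_of_ne_nil hne, l.getLast!, getLast_mem_of_ne_nil hne,
      by omega⟩

-- ===== VERDICT =====
theorem has_2_double_chars_py_spec : Claim_equal_has_2_double_chars_py := by
  intro password _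
  unfold Spec_has_2_double_chars_py has_2_double_chars_py has_2_double_chars_py_alt
  rw [loopA_greedy (password.toList.length - 0) password.toList 0 0 rfl (by omega),
    List.drop_zero, Nat.zero_add]
  show decide (2 ≤ pvGreedy password.toList)
      = (decide (2 ≤ (pvIdxsB password.toList).length) &&
         decide ((2 : Int) ≤ ((pvIdxsB password.toList).getLast! : Int)
            - ((pvIdxsB password.toList).head! : Int)))
  have hiff := (greedy_two_iff password.toList).trans
    (sorted_exists_iff _ (idxsB_pairwise password.toList))
  by_cases h2 : 2 ≤ pvGreedy password.toList
  · rw [decide_eq_true h2, decide_eq_true (hiff.mp h2).1,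
      decide_eq_true (hiff.mp h2).2, Bool.and_self]
  · rw [decide_eq_false h2]
    rcases not_and_or.mp (fun hc => h2 (hiff.mpr hc)) with hp | hq
    · rw [decide_eq_false hp, Bool.false_and]
    · rw [decide_eq_false hq, Bool.and_false]
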